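-- pv_equiv track=rewrite | github.com/UCLeuvenLimburg/vpw | cat4/keigraaf/python/fvogels.py | solve
-- ===== SOURCE A (Python) =====
-- def next_generation(current_generation, arcs):
--     result = [ 0 ] * len(current_generation)
--
--     for i in range(len(current_generation)):
--         destinations = arcs[i]
--         per_destination = current_generation[i] // len(destinations)
--         leftover = current_generation[i] % len(destinations)
--
--         for destination in destinations:
--             result[destination] += per_destination
--
--         result[i] += leftover
--
--     return tuple(result)
--
-- def solve(initial, arcs):
--     history = { initial: 0 }
--
--     current = next_generation(initial, arcs)
--     i = 1
--
--     while current not in history: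
--         history[current] = i
--         i += 1
--         current = next_generation(current, arcs)
--
--     return i - history[current]
-- ===== SOURCE B (Python) =====
-- def next_generation(current_generation, arcs):
--     result = [ 0 ] * len(current_generation)
--
--     for i in range(len(current_generation)):
--         destinations = arcs[i]
--         per_destination = current_generation[i] // len(destinations)
--         leftover = current_generation[i] % len(destinations)
--
--         for destination in destinations:
--             result[destination] += per_destination
--
--         result[i] += leftover
--
--     return tuple(result)
--
-- def solve(initial, arcs):
--     # Floyd cycle detection instead of a history dictionary: O(1) extra space.
--     tortoise = next_generation(initial, arcs)
--     hare = next_generation(tortoise, arcs)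
--     while tortoise != hare:
--         tortoise = next_generation(tortoise, arcs)
--         hare = next_generation(next_generation(hare, arcs), arcs)
--     # tortoise is on the cycle: count its length.
--     length = 1
--     probe = next_generation(tortoise, arcs)
--     while probe != tortoise:
--         probe = next_generation(probe, arcs)
--         length += 1
--     return length
-- ===== Notes on version B (the rewrite author's own statement) =====
-- stated objective: alternative
-- what changed: solve's history dictionary is replaced by Floyd's tortoise-and-hare cycle detection followed by a direct cycle-length count, using O(1) extra space instead of a dict of all visited states (next_generation is unchanged).
-- outside the precondition, e.g. on solve((-1,), [[0]]): A returns 1, B returns 1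
import Mathlib
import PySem

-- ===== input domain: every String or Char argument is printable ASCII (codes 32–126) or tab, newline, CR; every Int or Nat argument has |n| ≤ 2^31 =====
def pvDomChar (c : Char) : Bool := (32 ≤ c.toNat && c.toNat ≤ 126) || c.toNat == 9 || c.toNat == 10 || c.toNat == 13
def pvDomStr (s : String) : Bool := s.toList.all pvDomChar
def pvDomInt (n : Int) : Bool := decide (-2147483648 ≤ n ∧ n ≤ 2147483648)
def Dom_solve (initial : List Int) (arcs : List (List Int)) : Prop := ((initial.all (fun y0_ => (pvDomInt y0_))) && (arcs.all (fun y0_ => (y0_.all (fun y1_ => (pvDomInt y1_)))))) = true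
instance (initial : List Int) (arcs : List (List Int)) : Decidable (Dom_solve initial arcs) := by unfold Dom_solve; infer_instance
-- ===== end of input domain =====

-- B replaces A's history dictionary with Floyd's tortoise-and-hare cycle detection
-- plus a direct cycle-length count (O(1) extra space); return values agree on Pre_solve.

-- ===== PORT A =====
-- shared helper: literal port of next_generation (identical in Source A and Source B)
def nextGeneration (cur : List Int) (arcs : List (List Int)) : List Int :=
  (PySem.List.pyRange 0 (cur.length : Int) 1).foldl
    (fun result i =>
      let destinations := PySem.List.pyGetD arcs i []
      let per := PySem.Int.floordiv (PySem.List.pyGetD cur i 0) (destinations.length : Int)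
      let leftover := PySem.Int.mod (PySem.List.pyGetD cur i 0) (destinations.length : Int)
      let result2 := destinations.foldl
        (fun r d => PySem.List.pySetD r d (PySem.List.pyGetD r d 0 + per)) result
      PySem.List.pySetD result2 i (PySem.List.pyGetD result2 i 0 + leftover))
    (List.replicate cur.length 0)

-- fuel bound: the number of length-n states with nonnegative entries of fixed sum is
-- at most (sum+1)^n, so a repeat occurs within stateBound steps (proved below)
def stateBound (initial : List Int) : Nat := (initial.sum.toNat + 1) ^ initial.length

-- the 'while current not in history' loop of A (fuel is a termination guard only)
def solveLoop (arcs : List (List Int)) :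
    Nat → PySem.Dict (List Int) Int → List Int → Int → Int
  | 0, history, current, i => i - history.getD current 0
  | fuel + 1, history, current, i =>
    if history.contains current then i - history.getD current 0
    else solveLoop arcs fuel (history.insert current i) (nextGeneration current arcs) (i + 1)

def solve (initial : List Int) (arcs : List (List Int)) : Int :=
  solveLoop arcs (stateBound initial + 2)
    (PySem.Dict.empty.insert initial 0) (nextGeneration initial arcs) 1

-- ===== PORT B =====
-- 'while tortoise != hare' (advance by one and by two)
def floydMeet (arcs : List (List Int)) : Nat → List Int → List Int → List Int
  | 0, t, _ => t
  | fuel + 1, t, h =>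
    if t == h then t
    else floydMeet arcs fuel (nextGeneration t arcs)
      (nextGeneration (nextGeneration h arcs) arcs)

-- 'while probe != tortoise' cycle-length count
def cycleLen (arcs : List (List Int)) : Nat → List Int → List Int → Int → Int
  | 0, _, _, len => len
  | fuel + 1, t, probe, len =>
    if probe == t then len
    else cycleLen arcs fuel t (nextGeneration probe arcs) (len + 1)

def solve_alt (initial : List Int) (arcs : List (List Int)) : Int :=
  let fuel := 2 * stateBound initial + 2
  let tortoise := nextGeneration initial arcs
  let hare := nextGeneration tortoise arcs
  let meet := floydMeet arcs fuel tortoise hare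
  cycleLen arcs fuel meet (nextGeneration meet arcs) 1

-- ===== PRECONDITION & SPEC =====
-- Pre_solve excludes (a) shapes on which A raises (arcs shorter than initial, an empty
-- destination list, a destination index out of Python's range) and (b) negative
-- populations: on those A is not guaranteed to terminate (it loops forever on some of
-- them), so Pre_solve restricts to the puzzle's natural domain of nonnegative
-- populations, excluding also some negative inputs on which A happens to return.
def Pre_solve (initial : List Int) (arcs : List (List Int)) : Prop :=
  initial.length ≤ arcs.length ∧
  (∀ v ∈ initial, 0 ≤ v) ∧
  (∀ l ∈ arcs.take initial.length, l ≠ [] ∧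
    ∀ d ∈ l, -(initial.length : Int) ≤ d ∧ d < (initial.length : Int))
instance (initial : List Int) (arcs : List (List Int)) : Decidable (Pre_solve initial arcs) := by
  unfold Pre_solve; infer_instance

def pvWitness_solve : List Int × List (List Int) := ([1, 2], [[1], [0]])

def Spec_solve (initial : List Int) (arcs : List (List Int)) (out : Int) : Prop := out = solve_alt initial arcs
instance (initial : List Int) (arcs : List (List Int)) (out : Int) : Decidable (Spec_solve initial arcs out) := by unfold Spec_solve; infer_instance

-- ===== CLAIM (what is proved, stated in full; the proofs are below) =====
def Claim_equal_solve : Prop := ∀ (initial : List Int) (arcs : List (List Int)), Dom_solve initial arcs → Pre_solve initial arcs → Spec_solve initial arcs (solve initial arcs)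

-- ===== LEMMAS AND PROOFS =====

-- proof-side name for the body of next_generation's outer loop
def ngStep (cur : List Int) (arcs : List (List Int)) : List Int → Int → List Int :=
  fun result i =>
    let destinations := PySem.List.pyGetD arcs i []
    let per := PySem.Int.floordiv (PySem.List.pyGetD cur i 0) (destinations.length : Int)
    let leftover := PySem.Int.mod (PySem.List.pyGetD cur i 0) (destinations.length : Int)
    let result2 := destinations.foldl
      (fun r d => PySem.List.pySetD r d (PySem.List.pyGetD r d 0 + per)) result
    PySem.List.pySetD result2 i (PySem.List.pyGetD result2 i 0 + leftover)

lemma nextGeneration_eq (cur : List Int) (arcs : List (List Int)) :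
    nextGeneration cur arcs
      = (PySem.List.pyRange 0 (cur.length : Int) 1).foldl (ngStep cur arcs)
          (List.replicate cur.length 0) := rfl

-- the iteration map and the orbit of the initial state
def fA (arcs : List (List Int)) : List Int → List Int := fun s => nextGeneration s arcs
def xk (initial : List Int) (arcs : List (List Int)) (k : Nat) : List Int := (fA arcs)^[k] initial

-- a "good" state: length n, nonnegative entries, fixed sum S
def OkS (n : Nat) (S : Int) (s : List Int) : Prop :=
  s.length = n ∧ (∀ v ∈ s, 0 ≤ v) ∧ s.sum = S

-- effective (wrapped) index of Python's xs[d] for -n ≤ d < n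
def effIdx (n : Nat) (d : Int) : Nat := if 0 ≤ d then d.toNat else n - (-d).toNat

lemma effIdx_lt {n : Nat} {d : Int} (h1 : -(n : Int) ≤ d) (h2 : d < n) : effIdx n d < n := by
  unfold effIdx; split_ifs <;> omega

lemma pyIdx_eq {n : Nat} {d : Int} (h1 : -(n : Int) ≤ d) (h2 : d < n) :
    PySem.List.pyIdx? n d = some (effIdx n d) := by
  simp only [PySem.List.pyIdx?, effIdx]; split_ifs <;> simp_all

lemma pyGetD_eff {n : Nat} {d : Int} {r : List Int} {v : Int} (hr : r.length = n)
    (h1 : -(n : Int) ≤ d) (h2 : d < n) (he : effIdx n d < n) :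
    PySem.List.pyGetD r d v = r[effIdx n d]'(by omega) := by
  simp only [PySem.List.pyGetD, PySem.List.pyGet?, hr, pyIdx_eq h1 h2]
  simp [List.getElem?_eq_getElem (by omega : effIdx n d < r.length)]

lemma pySetD_eff {n : Nat} {d : Int} {r : List Int} {v : Int} (hr : r.length = n)
    (h1 : -(n : Int) ≤ d) (h2 : d < n) :
    PySem.List.pySetD r d v = r.set (effIdx n d) v := by
  simp only [PySem.List.pySetD, PySem.List.pySet?, hr, pyIdx_eq h1 h2]
  simp

-- the inner 'for destination in destinations' fold
lemma innerFold {n : Nat} (per : Int) (hper : 0 ≤ per) :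
    ∀ (dest : List Int) (r : List Int), r.length = n →
      (∀ d ∈ dest, -(n : Int) ≤ d ∧ d < (n : Int)) →
      (dest.foldl (fun r d => PySem.List.pySetD r d (PySem.List.pyGetD r d 0 + per)) r).length = n ∧
      (dest.foldl (fun r d => PySem.List.pySetD r d (PySem.List.pyGetD r d 0 + per)) r).sum
        = r.sum + per * dest.length ∧
      ((∀ v ∈ r, 0 ≤ v) →
        ∀ v ∈ dest.foldl (fun r d => PySem.List.pySetD r d (PySem.List.pyGetD r d 0 + per)) r, 0 ≤ v) := by
  intro dest
  induction dest with
  | nil => intro r hr _; simp [hr]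
  | cons d dest ih =>
    intro r hr hb
    obtain ⟨hd1, hd2⟩ := hb d (by simp)
    have he : effIdx (n := n) d < n := effIdx_lt hd1 hd2
    have hstep : PySem.List.pySetD r d (PySem.List.pyGetD r d 0 + per)
        = r.set (effIdx n d) (r[effIdx n d]'(by omega) + per) := by
      rw [pyGetD_eff hr hd1 hd2 he, pySetD_eff hr hd1 hd2]
    have hr' : (r.set (effIdx n d) (r[effIdx n d]'(by omega) + per)).length = n := by
      simp [hr]
    obtain ⟨ih1, ih2, ih3⟩ := ih (r.set (effIdx n d) (r[effIdx n d]'(by omega) + per)) hr'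
      (fun e he' => hb e (by simp [he']))
    simp only [List.foldl_cons, hstep]
    refine ⟨ih1, ?_, ?_⟩
    · rw [ih2, List.sum_set']
      have : effIdx n d < r.length := by omega
      rw [dif_pos this]
      simp only [List.length_cons]
      push_cast
      ring
    · intro hnn v hv
      refine ih3 ?_ v hv
      intro w hw
      rcases List.mem_or_eq_of_mem_set hw with hw | rfl
      · exact hnn w hw
      · have : 0 ≤ r[effIdx n d]'(by omega) := hnn _ (List.getElem_mem _)
        omega

-- one step of the outer loop of next_generation
lemma nextGen_ok {n : Nat} {S : Int} {arcs : List (List Int)} {cur : List Int}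
    (hlen : n ≤ arcs.length)
    (harcs : ∀ l ∈ arcs.take n, l ≠ [] ∧ ∀ d ∈ l, -(n : Int) ≤ d ∧ d < (n : Int))
    (h : OkS n S cur) : OkS n S (nextGeneration cur arcs) := by
  obtain ⟨hc, hcn, hcs⟩ := h
  have key : ∀ L : List Nat, (∀ i ∈ L, i < n) → ∀ r : List Int, r.length = n →
      (∀ v ∈ r, 0 ≤ v) →
      ((L.map (Nat.cast : Nat → Int)).foldl (ngStep cur arcs) r).length = n ∧
      (∀ v ∈ (L.map (Nat.cast : Nat → Int)).foldl (ngStep cur arcs) r, 0 ≤ v) ∧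
      ((L.map (Nat.cast : Nat → Int)).foldl (ngStep cur arcs) r).sum
          = r.sum + (L.map (fun i => cur.getD i 0)).sum := by
    intro L
    induction L with
    | nil => intro _ r hr hrn; exact ⟨hr, hrn, by simp⟩
    | cons i L ihL =>
      intro hL r hr hrn
      have hi : i < n := hL i (by simp)
      have hia : i < arcs.length := by omega
      -- the destination list
      have hdst : arcs[i] ∈ arcs.take n := by
        have hlt : i < (arcs.take n).length := by simp [List.length_take]; omega
        have : (arcs.take n)[i] = arcs[i] := List.getElem_take
        rw [← this]
        exact List.getElem_mem hlt
      obtain ⟨hne, hbnd⟩ := harcs _ hdst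
      have hdl : 0 < arcs[i].length := List.length_pos_of_ne_nil hne
      have hgarcs : PySem.List.pyGetD arcs (i : Int) [] = arcs[i] := by
        simp [List.getElem?_eq_getElem hia]
      have hgcur : PySem.List.pyGetD cur (i : Int) 0 = cur[i]'(by omega) := by
        simp [List.getElem?_eq_getElem (by omega : i < cur.length)]
      have hcuri : 0 ≤ cur[i]'(by omega) := hcn _ (List.getElem_mem _)
      have hper : 0 ≤ PySem.Int.floordiv (cur[i]'(by omega)) (arcs[i].length : Int) := by
        rw [PySem.Int.floordiv_eq_ediv_of_pos (by exact_mod_cast hdl)]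
        exact Int.ediv_nonneg hcuri (by positivity)
      have hlef : 0 ≤ PySem.Int.mod (cur[i]'(by omega)) (arcs[i].length : Int) :=
        PySem.Int.mod_nonneg _ (by exact_mod_cast hdl)
      simp only [List.map_cons, List.foldl_cons, ngStep, hgarcs, hgcur]
      obtain ⟨if1, if2, if3⟩ := innerFold (n := n) _ hper arcs[i] r hr hbnd
      set r2 := arcs[i].foldl
        (fun r d => PySem.List.pySetD r d (PySem.List.pyGetD r d 0 +
          PySem.Int.floordiv (cur[i]'(by omega)) (arcs[i].length : Int))) r with hr2def
      have hg2 : PySem.List.pyGetD r2 (i : Int) 0 = r2[i]'(by omega) := by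
        simp [List.getElem?_eq_getElem (by omega : i < r2.length)]
      have hset : PySem.List.pySetD r2 (i : Int)
          (r2[i]'(by omega) + PySem.Int.mod (cur[i]'(by omega)) (arcs[i].length : Int))
          = r2.set i (r2[i]'(by omega) + PySem.Int.mod (cur[i]'(by omega)) (arcs[i].length : Int)) := by
        simp
      rw [hg2, hset]
      have hr3 : (r2.set i (r2[i]'(by omega) +
          PySem.Int.mod (cur[i]'(by omega)) (arcs[i].length : Int))).length = n := by
        simp [if1]
      obtain ⟨o1, o2, o3⟩ := ihL (fun j hj => hL j (by simp [hj])) _ hr3 (by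
        intro v hv
        rcases List.mem_or_eq_of_mem_set hv with hv | rfl
        · exact (if3 hrn) v hv
        · have : 0 ≤ r2[i]'(by omega) := by
            exact (if3 hrn) _ (List.getElem_mem _)
          omega)
      refine ⟨o1, o2, ?_⟩
      rw [o3, List.sum_set', dif_pos (by omega : i < r2.length), if2]
      have halg : PySem.Int.floordiv (cur[i]'(by omega)) (arcs[i].length : Int) * (arcs[i].length : Int)
          + PySem.Int.mod (cur[i]'(by omega)) (arcs[i].length : Int) = cur[i]'(by omega) :=
        PySem.Int.floordiv_mul_add_mod _ _
      simp only [List.sum_cons, List.getD_eq_getElem _ _ (by omega : i < cur.length)]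
      ring_nf
      ring_nf at halg
      omega
  have hrange := key (List.range n) (by intro i hi; exact List.mem_range.mp hi)
    (List.replicate n 0) (by simp) (by intro v hv; simp_all [List.eq_of_mem_replicate hv])
  have hmapsum : (List.range n).map (fun i => cur.getD i 0) = cur := by
    apply List.ext_getElem
    · simp [hc]
    · intro j h1 h2
      simp only [List.getElem_map, List.getElem_range]
      exact List.getD_eq_getElem _ _ (by omega)
  rw [nextGeneration_eq, hc, PySem.List.pyRange_zero_natCast]
  obtain ⟨k1, k2, k3⟩ := hrange
  refine ⟨k1, k2, ?_⟩
  rw [k3, hmapsum, List.sum_replicate]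
  simp [hcs]

lemma xk_zero (initial : List Int) (arcs : List (List Int)) : xk initial arcs 0 = initial := rfl

lemma xk_succ (initial : List Int) (arcs : List (List Int)) (k : Nat) :
    xk initial arcs (k + 1) = nextGeneration (xk initial arcs k) arcs := by
  simp [xk, Function.iterate_succ_apply']; rfl

lemma xk_add (initial : List Int) (arcs : List (List Int)) (a b : Nat) :
    xk initial arcs (a + b) = (fA arcs)^[a] (xk initial arcs b) := by
  simp [xk, Function.iterate_add_apply]

lemma xk_ok {initial : List Int} {arcs : List (List Int)}
    (hP : Pre_solve initial arcs) (k : Nat) :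
    OkS initial.length initial.sum (xk initial arcs k) := by
  induction k with
  | zero => exact ⟨rfl, hP.2.1, rfl⟩
  | succ k ih => rw [xk_succ]; exact nextGen_ok hP.1 hP.2.2 ih

-- the finite set of good states
def valsF (S : Int) : Finset Int := (Finset.range (S.toNat + 1)).image (fun m => (m : Nat) : Nat → Int)

def statesF (S : Int) : Nat → Finset (List Int)
  | 0 => {[]}
  | n + 1 => (valsF S ×ˢ statesF S n).image (fun p => p.1 :: p.2)

lemma mem_valsF {S v : Int} (hS : 0 ≤ S) : v ∈ valsF S ↔ 0 ≤ v ∧ v ≤ S := by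
  unfold valsF
  simp only [Finset.mem_image, Finset.mem_range]
  constructor
  · rintro ⟨m, hm, rfl⟩; constructor <;> omega
  · rintro ⟨h1, h2⟩; exact ⟨v.toNat, by omega, by omega⟩

lemma card_valsF (S : Int) : (valsF S).card = S.toNat + 1 := by
  unfold valsF
  rw [Finset.card_image_of_injective _ (fun a b h => by exact_mod_cast h)]
  simp

lemma mem_statesF {S : Int} (hS : 0 ≤ S) : ∀ {n : Nat} {s : List Int},
    s ∈ statesF S n ↔ s.length = n ∧ ∀ v ∈ s, 0 ≤ v ∧ v ≤ S := by
  intro n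
  induction n with
  | zero =>
    intro s
    simp only [statesF, Finset.mem_singleton]
    constructor
    · rintro rfl; simp
    · rintro ⟨h1, _⟩; exact List.eq_nil_of_length_eq_zero h1
  | succ n ih =>
    intro s
    simp only [statesF, Finset.mem_image, Finset.mem_product]
    constructor
    · rintro ⟨⟨v, t⟩, ⟨hv, ht⟩, rfl⟩
      obtain ⟨hl, hall⟩ := ih.mp ht
      refine ⟨by simp [hl], ?_⟩
      intro w hw
      rcases List.mem_cons.mp hw with rfl | hw
      · exact (mem_valsF hS).mp hv
      · exact hall w hw
    · rintro ⟨hl, hall⟩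
      match s, hl with
      | v :: t, hl =>
        refine ⟨(v, t), ⟨(mem_valsF hS).mpr (hall v (by simp)), ih.mpr ⟨by simpa using hl, fun w hw => hall w (by simp [hw])⟩⟩, rfl⟩

lemma card_statesF (S : Int) : ∀ n : Nat, (statesF S n).card = (S.toNat + 1) ^ n := by
  intro n
  induction n with
  | zero => simp [statesF]
  | succ n ih =>
    have hinj : Function.Injective (fun p : Int × List Int => p.1 :: p.2) := by
      rintro ⟨a, b⟩ ⟨c, d⟩ h
      simp only [List.cons.injEq] at h
      simp [h.1, h.2]
    rw [statesF, Finset.card_image_of_injective _ hinj, Finset.card_product, card_valsF, ih]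
    ring

lemma exists_repeat {initial : List Int} {arcs : List (List Int)}
    (hP : Pre_solve initial arcs) :
    ∃ a b : Nat, a < b ∧ b ≤ stateBound initial ∧ xk initial arcs a = xk initial arcs b := by
  have hS : 0 ≤ initial.sum := List.sum_nonneg hP.2.1
  have hmaps : ∀ k ∈ Finset.range (stateBound initial + 1),
      xk initial arcs k ∈ statesF initial.sum initial.length := by
    intro k _
    obtain ⟨h1, h2, h3⟩ := xk_ok hP k
    exact (mem_statesF hS).mpr ⟨h1, fun v hv =>
      ⟨h2 v hv, h3 ▸ List.single_le_sum h2 v hv⟩⟩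
  have hcard : (statesF initial.sum initial.length).card
      < (Finset.range (stateBound initial + 1)).card := by
    rw [card_statesF, Finset.card_range]
    exact Nat.lt_succ_self _
  obtain ⟨a, ha, b, hb, hne, heq⟩ :=
    Finset.exists_ne_map_eq_of_card_lt_of_maps_to hcard hmaps
  rcases Nat.lt_or_ge a b with h | h
  · exact ⟨a, b, h, by simpa using Finset.mem_range.mp hb, heq⟩
  · have : b < a := by omega
    exact ⟨b, a, this, by simpa using Finset.mem_range.mp ha, heq.symm⟩

-- the history dictionary after t loop iterations
def histUpTo (initial : List Int) (arcs : List (List Int)) : Nat → PySem.Dict (List Int) Int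
  | 0 => PySem.Dict.empty.insert initial 0
  | k + 1 => (histUpTo initial arcs k).insert (xk initial arcs (k + 1)) ((k : Int) + 1)

lemma contains_histUpTo (initial : List Int) (arcs : List (List Int)) (t : Nat) (s : List Int) :
    (histUpTo initial arcs t).contains s = true ↔ ∃ j ≤ t, xk initial arcs j = s := by
  induction t with
  | zero =>
    rw [histUpTo, PySem.Dict.contains_insert]
    simp only [PySem.Dict.contains_empty, Bool.or_false, beq_iff_eq]
    constructor
    · intro h; exact ⟨0, le_refl 0, h.symm⟩
    · rintro ⟨j, hj, hx⟩
      interval_cases j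
      exact hx.symm
  | succ t ih =>
    rw [histUpTo, PySem.Dict.contains_insert]
    simp only [Bool.or_eq_true, beq_iff_eq, ih]
    constructor
    · rintro (h | ⟨j, hj, hx⟩)
      · exact ⟨t + 1, le_refl _, h.symm⟩
      · exact ⟨j, by omega, hx⟩
    · rintro ⟨j, hj, hx⟩
      rcases Nat.lt_or_ge j (t + 1) with h | h
      · exact Or.inr ⟨j, by omega, hx⟩
      · have : j = t + 1 := by omega
        subst this
        exact Or.inl hx.symm

lemma getD_histUpTo (initial : List Int) (arcs : List (List Int)) (istar : Nat)
    (hmin : ∀ q : Nat, 0 < q → q < istar → ∀ j < q, xk initial arcs j ≠ xk initial arcs q) :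
    ∀ t : Nat, t < istar → ∀ j : Nat, j ≤ t →
      (histUpTo initial arcs t).getD (xk initial arcs j) 0 = (j : Int) := by
  intro t
  induction t with
  | zero =>
    intro _ j hj
    interval_cases j
    rw [histUpTo]
    exact PySem.Dict.getD_insert_self _ _ _ _
  | succ t ih =>
    intro ht j hj
    rw [histUpTo]
    rcases Nat.lt_or_ge j (t + 1) with h | h
    · rw [PySem.Dict.getD_insert_of_ne _ _ _
        (fun heq => hmin (t + 1) (by omega) ht j h heq)]
      exact ih (by omega) j (by omega)
    · have : j = t + 1 := by omega
      subst this
      rw [PySem.Dict.getD_insert_self]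
      push_cast
      ring

-- A's loop returns istar - jstar
lemma solveLoop_eq (initial : List Int) (arcs : List (List Int)) (istar jstar : Nat)
    (hj : jstar < istar)
    (hrep : xk initial arcs jstar = xk initial arcs istar)
    (hmin : ∀ q : Nat, 0 < q → q < istar → ∀ j < q, xk initial arcs j ≠ xk initial arcs q)
    (hjmin : ∀ j < jstar, xk initial arcs j ≠ xk initial arcs istar) :
    ∀ fuel i : Nat, 1 ≤ i → i ≤ istar → istar - i < fuel →
      solveLoop arcs fuel (histUpTo initial arcs (i - 1)) (xk initial arcs i) (i : Int)
        = (istar : Int) - (jstar : Int) := by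
  intro fuel
  induction fuel with
  | zero => intro i _ _ h3; omega
  | succ fuel ih =>
    intro i h1 h2 h3
    rw [solveLoop]
    rcases eq_or_lt_of_le h2 with rfl | hlt
    · have hc : (histUpTo initial arcs (i - 1)).contains (xk initial arcs i) = true :=
        (contains_histUpTo initial arcs _ _).mpr ⟨jstar, by omega, by rw [hrep]⟩
      rw [if_pos hc, ← hrep,
        getD_histUpTo initial arcs i hmin (i - 1) (by omega) jstar (by omega)]
    · have hnc : ¬ ((histUpTo initial arcs (i - 1)).contains (xk initial arcs i) = true) := by
        intro h
        obtain ⟨j, hj, hx⟩ := (contains_histUpTo initial arcs _ _).mp h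
        exact hmin i (by omega) hlt j (by omega) hx
      rw [if_neg hnc]
      have hh : (histUpTo initial arcs (i - 1)).insert (xk initial arcs i) (i : Int)
          = histUpTo initial arcs i := by
        conv_rhs => rw [show i = (i - 1) + 1 by omega]
        rw [histUpTo]
        congr 1
        · rw [show (i - 1) + 1 = i by omega]
        · omega
      rw [hh, ← xk_succ]
      have hcast : (i : Int) + 1 = ((i + 1 : Nat) : Int) := by push_cast; ring
      rw [hcast]
      exact ih (i + 1) (by omega) (by omega) (by omega)

-- B's first loop returns the meeting state
lemma floydMeet_eq (initial : List Int) (arcs : List (List Int)) (m0 : Nat)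
    (hm : 0 < m0) (hmeet : xk initial arcs m0 = xk initial arcs (2 * m0))
    (hmmin : ∀ q : Nat, 0 < q → q < m0 → xk initial arcs q ≠ xk initial arcs (2 * q)) :
    ∀ fuel k : Nat, 1 ≤ k → k ≤ m0 → m0 - k < fuel →
      floydMeet arcs fuel (xk initial arcs k) (xk initial arcs (2 * k)) = xk initial arcs m0 := by
  intro fuel
  induction fuel with
  | zero => intro k _ _ h3; omega
  | succ fuel ih =>
    intro k h1 h2 h3
    rw [floydMeet]
    rcases eq_or_lt_of_le h2 with rfl | hlt
    · rw [if_pos (beq_iff_eq.mpr hmeet)]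
    · rw [if_neg (by simpa using hmmin k (by omega) hlt)]
      rw [← xk_succ]
      have hhare : nextGeneration (nextGeneration (xk initial arcs (2 * k)) arcs) arcs
          = xk initial arcs (2 * (k + 1)) := by
        rw [show 2 * (k + 1) = (2 * k + 1) + 1 by omega, xk_succ, xk_succ]
      rw [hhare]
      exact ih (k + 1) (by omega) (by omega) (by omega)

-- B's second loop returns the minimal period of the meeting state
lemma cycleLen_eq (arcs : List (List Int)) (y : List Int) (ρ : Nat)
    (hρ : 0 < ρ) (hy : (fA arcs)^[ρ] y = y)
    (hmin : ∀ q : Nat, 0 < q → q < ρ → (fA arcs)^[q] y ≠ y) :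
    ∀ fuel c : Nat, 1 ≤ c → c ≤ ρ → ρ - c < fuel →
      cycleLen arcs fuel y ((fA arcs)^[c] y) (c : Int) = (ρ : Int) := by
  intro fuel
  induction fuel with
  | zero => intro c _ _ h3; omega
  | succ fuel ih =>
    intro c h1 h2 h3
    rw [cycleLen]
    rcases eq_or_lt_of_le h2 with rfl | hlt
    · rw [if_pos (beq_iff_eq.mpr hy)]
    · rw [if_neg (by simpa using hmin c (by omega) hlt)]
      have hpr : nextGeneration ((fA arcs)^[c] y) arcs = (fA arcs)^[c + 1] y := by
        rw [Function.iterate_succ_apply']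
        rfl
      have hcast : (c : Int) + 1 = ((c + 1 : Nat) : Int) := by push_cast; ring
      rw [hpr, hcast]
      exact ih (c + 1) (by omega) (by omega) (by omega)

-- minimal period is constant along the orbit of a periodic point
lemma minPeriod_iterate (arcs : List (List Int)) (t : Nat) (z : List Int)
    (hz : z ∈ Function.periodicPts (fA arcs)) :
    Function.minimalPeriod (fA arcs) ((fA arcs)^[t] z) = Function.minimalPeriod (fA arcs) z ∧
      (fA arcs)^[t] z ∈ Function.periodicPts (fA arcs) := by
  induction t with
  | zero => exact ⟨rfl, hz⟩
  | succ t ih =>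
    obtain ⟨h1, h2⟩ := ih
    rw [Function.iterate_succ_apply']
    exact ⟨by rw [Function.minimalPeriod_apply h2, h1],
      by obtain ⟨p, hp, hpp⟩ := h2; exact ⟨p, hp, hpp.apply⟩⟩

-- ===== VERDICT (by name: the statement is the Claim_ definition above) =====
theorem solve_spec : Claim_equal_solve := by
  unfold Claim_equal_solve Spec_solve
  intro initial arcs _hD hP
  obtain ⟨a, b, hab, hbB, habeq⟩ := exists_repeat hP
  have hex : ∃ i : Nat, 0 < i ∧ ∃ j : Nat, j < i ∧ xk initial arcs j = xk initial arcs i :=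
    ⟨b, by omega, a, hab, habeq⟩
  set istar := Nat.find hex with histar
  obtain ⟨hipos, j0, hj0, hj0eq⟩ := Nat.find_spec hex
  have hiB : istar ≤ stateBound initial := le_trans (Nat.find_min' hex ⟨by omega, a, hab, habeq⟩) hbB
  have hmin : ∀ q : Nat, 0 < q → q < istar → ∀ j < q, xk initial arcs j ≠ xk initial arcs q := by
    intro q hq hqi j hj heq
    exact Nat.find_min hex hqi ⟨hq, j, hj, heq⟩
  have hexj : ∃ j : Nat, j < istar ∧ xk initial arcs j = xk initial arcs istar := ⟨j0, hj0, hj0eq⟩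
  set jstar := Nat.find hexj with hjstar
  obtain ⟨hjlt, hjeq⟩ := Nat.find_spec hexj
  have hjmin : ∀ j < jstar, xk initial arcs j ≠ xk initial arcs istar := by
    intro j hj heq
    exact Nat.find_min hexj hj ⟨by omega, heq⟩
  -- A's value
  have hA : solve initial arcs = (istar : Int) - (jstar : Int) := by
    unfold solve
    have h0 : PySem.Dict.empty.insert initial 0 = histUpTo initial arcs (1 - 1) := rfl
    have h1 : nextGeneration initial arcs = xk initial arcs 1 := by
      rw [xk_succ, xk_zero]
    have hone : (1 : Int) = ((1 : Nat) : Int) := by norm_num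
    rw [h0, h1, hone]
    exact solveLoop_eq initial arcs istar jstar hjlt hjeq hmin hjmin _ 1
      (le_refl 1) (by omega) (by omega)
  -- the first-repeat segment length equals the minimal period of xk jstar
  have hper : Function.IsPeriodicPt (fA arcs) (istar - jstar) (xk initial arcs jstar) := by
    show (fA arcs)^[istar - jstar] (xk initial arcs jstar) = xk initial arcs jstar
    rw [← xk_add, show istar - jstar + jstar = istar by omega, ← hjeq]
  have hmem : xk initial arcs jstar ∈ Function.periodicPts (fA arcs) :=
    ⟨istar - jstar, by omega, hper⟩
  set ρ := Function.minimalPeriod (fA arcs) (xk initial arcs jstar) with hρdef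
  have hρpos : 0 < ρ := Function.IsPeriodicPt.minimalPeriod_pos (by omega) hper
  have hρle : ρ ≤ istar - jstar := Function.IsPeriodicPt.minimalPeriod_le (by omega) hper
  have hmp : (fA arcs)^[ρ] (xk initial arcs jstar) = xk initial arcs jstar :=
    Function.isPeriodicPt_minimalPeriod _ _
  have hρeq : istar - jstar = ρ := by
    by_contra hne
    have hρlt : ρ < istar - jstar := by omega
    have hrep2 : xk initial arcs jstar = xk initial arcs (ρ + jstar) := by
      rw [xk_add, hmp]
    exact Nat.find_min hex (show ρ + jstar < istar by omega)
      ⟨by omega, jstar, by omega, hrep2⟩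
  -- the orbit is periodic with period ρ from index jstar on
  have hshift : ∀ k : Nat, jstar ≤ k → xk initial arcs (k + ρ) = xk initial arcs k := by
    intro k hk
    have h1 : xk initial arcs (ρ + jstar) = xk initial arcs jstar := by rw [xk_add, hmp]
    rw [show k + ρ = (k - jstar) + (ρ + jstar) by omega, xk_add, h1, ← xk_add,
      show k - jstar + jstar = k by omega]
  have hshiftm : ∀ t k : Nat, jstar ≤ k → xk initial arcs (k + t * ρ) = xk initial arcs k := by
    intro t
    induction t with
    | zero => intro k _; simp
    | succ t iht =>
      intro k hk
      rw [show k + (t + 1) * ρ = (k + t * ρ) + ρ by ring, hshift _ (by omega), iht k hk]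
  -- a meeting point of tortoise and hare exists
  have hdm := Nat.div_add_mod jstar ρ
  have hmod := Nat.mod_lt jstar hρpos
  have hm1meet : xk initial arcs (ρ * (jstar / ρ) + ρ) = xk initial arcs (2 * (ρ * (jstar / ρ) + ρ)) := by
    have := hshiftm (jstar / ρ + 1) (ρ * (jstar / ρ) + ρ) (by omega)
    rw [show ρ * (jstar / ρ) + ρ + (jstar / ρ + 1) * ρ = 2 * (ρ * (jstar / ρ) + ρ) by ring] at this
    exact this.symm
  have hmex : ∃ m : Nat, 0 < m ∧ xk initial arcs m = xk initial arcs (2 * m) :=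
    ⟨ρ * (jstar / ρ) + ρ, by omega, hm1meet⟩
  set m0 := Nat.find hmex with hm0def
  obtain ⟨hm0pos, hm0meet⟩ := Nat.find_spec hmex
  have hm0le : m0 ≤ istar := by
    have h1 : m0 ≤ ρ * (jstar / ρ) + ρ := Nat.find_min' hmex ⟨by omega, hm1meet⟩
    omega
  have hm0min : ∀ q : Nat, 0 < q → q < m0 → xk initial arcs q ≠ xk initial arcs (2 * q) := by
    intro q hq hqm heq
    exact Nat.find_min hmex hqm ⟨hq, heq⟩
  -- the meeting state is periodic with the same minimal period ρ
  have hym : Function.IsPeriodicPt (fA arcs) m0 (xk initial arcs m0) := by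
    show (fA arcs)^[m0] (xk initial arcs m0) = xk initial arcs m0
    rw [← xk_add, show m0 + m0 = 2 * m0 by omega, ← hm0meet]
  have hymem : xk initial arcs m0 ∈ Function.periodicPts (fA arcs) := ⟨m0, hm0pos, hym⟩
  have hmpy : Function.minimalPeriod (fA arcs) (xk initial arcs m0) = ρ := by
    rcases le_total jstar m0 with h | h
    · have hit : (fA arcs)^[m0 - jstar] (xk initial arcs jstar) = xk initial arcs m0 := by
        rw [← xk_add, show m0 - jstar + jstar = m0 by omega]
      rw [← hit]
      exact (minPeriod_iterate arcs (m0 - jstar) _ hmem).1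
    · have hit : (fA arcs)^[jstar - m0] (xk initial arcs m0) = xk initial arcs jstar := by
        rw [← xk_add, show jstar - m0 + m0 = jstar by omega]
      have := (minPeriod_iterate arcs (jstar - m0) _ hymem).1
      rw [hit] at this
      exact this.symm
  -- B's value
  have hB : solve_alt initial arcs = (ρ : Int) := by
    have h1 : nextGeneration initial arcs = xk initial arcs 1 := by
      rw [xk_succ, xk_zero]
    have h2 : nextGeneration (xk initial arcs 1) arcs = xk initial arcs (2 * 1) :=
      (xk_succ initial arcs 1).symm
    have hm : floydMeet arcs (2 * stateBound initial + 2) (xk initial arcs 1)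
        (xk initial arcs (2 * 1)) = xk initial arcs m0 :=
      floydMeet_eq initial arcs m0 hm0pos hm0meet hm0min _ 1 (le_refl 1) (by omega) (by omega)
    show cycleLen arcs (2 * stateBound initial + 2)
        (floydMeet arcs (2 * stateBound initial + 2) (nextGeneration initial arcs)
          (nextGeneration (nextGeneration initial arcs) arcs))
        (nextGeneration
          (floydMeet arcs (2 * stateBound initial + 2) (nextGeneration initial arcs)
            (nextGeneration (nextGeneration initial arcs) arcs)) arcs) 1 = (ρ : Int)
    rw [h1, h2, hm]
    have hy : (fA arcs)^[ρ] (xk initial arcs m0) = xk initial arcs m0 := by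
      have := Function.isPeriodicPt_minimalPeriod (fA arcs) (xk initial arcs m0)
      rwa [hmpy] at this
    have hymin : ∀ q : Nat, 0 < q → q < ρ → (fA arcs)^[q] (xk initial arcs m0) ≠ xk initial arcs m0 := by
      intro q hq hqρ heq
      have : ρ ≤ q := by
        rw [← hmpy]
        exact Function.IsPeriodicPt.minimalPeriod_le hq heq
      omega
    have hpr : nextGeneration (xk initial arcs m0) arcs = (fA arcs)^[1] (xk initial arcs m0) := by
      simp [fA]
    have hone : (1 : Int) = ((1 : Nat) : Int) := by norm_num
    rw [hpr, hone]
    exact cycleLen_eq arcs _ ρ hρpos hy hymin _ 1 (le_refl 1) (by omega) (by omega)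
  rw [hA, hB]
  omega
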